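-- pv_equiv track=rewrite | github.com/quantmew/ripperdoc | ripperdoc/utils/permissions/parse.py | strip_quoted_content_for_destructive_check
-- ===== SOURCE A (Python) =====
-- def strip_quoted_content_for_destructive_check(command: str) -> str:
--     """Strip content inside quotes for destructive command checking.
--
--     This prevents false positives like 'find . -name "rm -rf /"' from
--     triggering the rm -rf detection.
--     """
--     result: list[str] = []
--     in_single_quote = False
--     in_double_quote = False
--     escaped = False
--
--     for char in command:
--         if escaped:
--             escaped = False
--             if not in_single_quote and not in_double_quote:
--                 result.append(char)
--             continue
--
--         if char == "\\":
--             escaped = True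
--             if not in_single_quote and not in_double_quote:
--                 result.append(char)
--             continue
--
--         if char == "'" and not in_double_quote:
--             in_single_quote = not in_single_quote
--             continue
--
--         if char == '"' and not in_single_quote:
--             in_double_quote = not in_double_quote
--             continue
--
--         if not in_single_quote and not in_double_quote:
--             result.append(char)
--
--     return "".join(result)
-- ===== SOURCE B (Python) =====
-- def strip_quoted_content_for_destructive_check(command: str) -> str:
--     """Strip content inside quotes for destructive command checking."""
--     out = []
--     i = 0
--     n = len(command)
--     while i < n:
--         c = command[i]
--         if c == "\\":
--             out.append(c)
--             if i + 1 < n: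
--                 out.append(command[i + 1])
--             i += 2
--         elif c == "'" or c == '"':
--             # skip forward to the matching unescaped closing quote
--             i += 1
--             while i < n:
--                 if command[i] == "\\":
--                     i += 2
--                 elif command[i] == c:
--                     i += 1
--                     break
--                 else:
--                     i += 1
--         else:
--             out.append(c)
--             i += 1
--     return "".join(out)
-- ===== Notes on version B (the rewrite author's own statement) =====
-- stated objective: alternative
-- what changed: Replaces A's single pass carrying escaped/in_single_quote/in_double_quote boolean state with an index-based while loop that copies characters outside quotes (a backslash copies itself plus the next char) and, on an opening quote, runs a nested inner loop that skips forward past the matching unescaped closing quote.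
import Mathlib
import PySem

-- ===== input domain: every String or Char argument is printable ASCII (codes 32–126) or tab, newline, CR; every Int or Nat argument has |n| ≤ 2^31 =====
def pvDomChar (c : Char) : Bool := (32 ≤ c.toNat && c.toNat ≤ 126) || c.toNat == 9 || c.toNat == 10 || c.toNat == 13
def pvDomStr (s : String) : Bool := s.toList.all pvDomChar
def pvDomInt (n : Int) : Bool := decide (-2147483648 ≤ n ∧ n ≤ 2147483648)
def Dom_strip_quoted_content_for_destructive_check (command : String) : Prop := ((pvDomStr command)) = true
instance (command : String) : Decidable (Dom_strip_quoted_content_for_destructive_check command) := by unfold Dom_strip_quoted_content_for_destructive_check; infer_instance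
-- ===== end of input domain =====

-- B replaces A's carried escaped/in-quote boolean state machine by an index-style scan with a
-- nested skip-over-quoted-region pass (objective: alternative decomposition, same cost).

-- ===== PORT A =====
-- A's for-loop over the characters with state (in_single_quote, in_double_quote, escaped),
-- emitting characters in order; branches in A's order.
def stripAGo : List Char → Bool → Bool → Bool → List Char
  | [], _, _, _ => []
  | c :: rest, inS, inD, esc =>
    if esc then
      (if !inS && !inD then [c] else []) ++ stripAGo rest inS inD false
    else if c = '\\' then
      (if !inS && !inD then [c] else []) ++ stripAGo rest inS inD true
    else if c = '\'' && !inD then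
      stripAGo rest (!inS) inD false
    else if c = '"' && !inS then
      stripAGo rest inS (!inD) false
    else if !inS && !inD then
      c :: stripAGo rest inS inD false
    else
      stripAGo rest inS inD false

def strip_quoted_content_for_destructive_check (command : String) : String :=
  String.ofList (stripAGo command.toList false false false)

-- ===== PORT B =====
-- B's inner while loop: skip to just past the matching unescaped closing quote q
-- (a backslash skips two characters, anything else one); all branches yield [] at the end.
def skipQuoted (q : Char) : List Char → List Char
  | [] => []
  | [_] => []          -- one char left: backslash skips past end, closing quote or other char ends the input
  | c :: d :: rest =>
    if c = '\\' then skipQuoted q rest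
    else if c = q then d :: rest
    else skipQuoted q (d :: rest)

-- (termination lemma for stripBGo: the inner skip never lengthens the remainder)
theorem skipQuoted_length_le (q : Char) (l : List Char) : (skipQuoted q l).length ≤ l.length := by
  fun_induction skipQuoted q l <;> simp_all <;> omega

-- B's outer loop: copy chars; on a backslash copy it and the next char; on a quote, skip the region.
def stripBGo : List Char → List Char
  | [] => []
  | c :: rest =>
    if c = '\\' then
      match rest with
      | [] => [c]
      | d :: rest' => c :: d :: stripBGo rest'
    else if c = '\'' || c = '"' then
      stripBGo (skipQuoted c rest)
    else
      c :: stripBGo rest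
termination_by l => l.length
decreasing_by
  all_goals simp_all
  have := skipQuoted_length_le c rest; omega

def strip_quoted_content_for_destructive_check_alt (command : String) : String :=
  String.ofList (stripBGo command.toList)

-- ===== PRECONDITION & SPEC =====
def Spec_strip_quoted_content_for_destructive_check (command : String) (out : String) : Prop := out = strip_quoted_content_for_destructive_check_alt command
instance (command : String) (out : String) : Decidable (Spec_strip_quoted_content_for_destructive_check command out) := by unfold Spec_strip_quoted_content_for_destructive_check; infer_instance

-- ===== CLAIM (what is proved, stated in full; the proofs are below) =====
def Claim_equal_strip_quoted_content_for_destructive_check : Prop := ∀ (command : String), Dom_strip_quoted_content_for_destructive_check command → Spec_strip_quoted_content_for_destructive_check command (strip_quoted_content_for_destructive_check command)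

-- ===== LEMMAS AND PROOFS =====

-- Inside a single-quoted region A emits nothing and leaves it exactly where B's skip does.
theorem stripAGo_quoteS (l : List Char) :
    stripAGo l true false false = stripAGo (skipQuoted '\'' l) false false false := by
  fun_induction skipQuoted '\'' l <;> simp_all [stripAGo]

-- Inside a double-quoted region A emits nothing and leaves it exactly where B's skip does.
theorem stripAGo_quoteD (l : List Char) :
    stripAGo l false true false = stripAGo (skipQuoted '\"' l) false false false := by
  fun_induction skipQuoted '\"' l <;> simp_all [stripAGo]

theorem stripGo_eq (l : List Char) : stripAGo l false false false = stripBGo l := by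
  fun_induction stripBGo l
  all_goals simp_all [stripAGo]
  rename_i c rest h1 h2 ih
  rcases h2 with h | h <;> subst h <;>
    simp [stripAGo_quoteS, stripAGo_quoteD, ih]

-- ===== VERDICT (by name: the statement is the Claim_ definition above) =====
theorem strip_quoted_content_for_destructive_check_spec : Claim_equal_strip_quoted_content_for_destructive_check := by
  intro command _
  unfold Spec_strip_quoted_content_for_destructive_check strip_quoted_content_for_destructive_check strip_quoted_content_for_destructive_check_alt
  rw [stripGo_eq]
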